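-- pv_equiv track=rewrite | github.com/hajrasarwar11/Smart-Campus-Resource-Management-System | CBS-Desktop-based application/SmartCampus/utils/visualization.py | get_bookings_by_day
-- ===== SOURCE A (Python) =====
-- def get_bookings_by_day(bookings):
--     """Group bookings by day of week"""
--     days = ["Monday", "Tuesday", "Wednesday", "Thursday", "Friday"]
--     day_counts = {day: 0 for day in days}
--
--     # For now, distribute bookings randomly across days
--     # In production, you'd use actual booking dates
--     if bookings:
--         per_day = len(bookings) // 5
--         for i, day in enumerate(days):
--             day_counts[day] = per_day + (1 if i < len(bookings) % 5 else 0)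
--
--     return day_counts
-- ===== SOURCE B (Python) =====
-- def get_bookings_by_day(bookings):
--     """Group bookings by day of week"""
--     days = ["Monday", "Tuesday", "Wednesday", "Thursday", "Friday"]
--     counts = [0, 0, 0, 0, 0]
--     for idx, _ in enumerate(bookings):
--         counts[idx % 5] += 1
--     return dict(zip(days, counts))
-- ===== Notes on version B (the rewrite author's own statement) =====
-- stated objective: alternative
-- what changed: Instead of A's closed-form quotient/remainder assignment into a pre-zeroed dict over the fixed days list, B distributes the bookings round-robin into a plain 5-slot counts list by iterating over the booking indices, and builds the dict once at the end with dict(zip(days, counts)); no empty-list special case is needed.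
import Mathlib
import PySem

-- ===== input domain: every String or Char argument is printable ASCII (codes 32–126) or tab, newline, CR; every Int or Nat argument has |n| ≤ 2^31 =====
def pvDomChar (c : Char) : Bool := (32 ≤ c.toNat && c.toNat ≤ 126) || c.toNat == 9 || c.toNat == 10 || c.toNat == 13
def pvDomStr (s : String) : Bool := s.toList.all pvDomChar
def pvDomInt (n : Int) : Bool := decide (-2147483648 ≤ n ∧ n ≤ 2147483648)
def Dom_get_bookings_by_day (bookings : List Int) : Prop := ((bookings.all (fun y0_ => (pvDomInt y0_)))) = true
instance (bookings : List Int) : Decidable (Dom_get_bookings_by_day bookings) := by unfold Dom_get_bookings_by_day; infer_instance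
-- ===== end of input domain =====

-- B distributes the bookings round-robin into a 5-slot counts list and builds the
-- dict once from zip(days, counts), instead of A's quotient/remainder dict fill
-- (objective: alternative).


-- ===== PORT A =====
def get_bookings_by_day (bookings : List Int) : List (String × Int) :=
  let days : List String := ["Monday", "Tuesday", "Wednesday", "Thursday", "Friday"]
  let day_counts : PySem.Dict String Int := days.foldl (fun d day => d.insert day 0) ⟨[]⟩
  if bookings ≠ [] then
    let per_day : Int := PySem.Int.floordiv (bookings.length : Int) 5
    ((PySem.List.enumerate days 0).foldl
      (fun d p =>
        d.insert p.2 (per_day + (if p.1 < PySem.Int.mod (bookings.length : Int) 5 then 1 else 0)))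
      day_counts).items
  else
    day_counts.items

-- ===== PORT B =====
def get_bookings_by_day_alt (bookings : List Int) : List (String × Int) :=
  let days : List String := ["Monday", "Tuesday", "Wednesday", "Thursday", "Friday"]
  -- counts[idx % 5] += 1 over the booking indices; idx % 5 < 5 so the index is in range
  let counts : List Int :=
    (PySem.List.enumerate bookings 0).foldl
      (fun c p =>
        PySem.List.pySetD c (PySem.Int.mod p.1 5)
          (PySem.List.pyGetD c (PySem.Int.mod p.1 5) 0 + 1))
      [0, 0, 0, 0, 0]
  -- dict(zip(days, counts)): insert the five (day, count) pairs in order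
  ((days.zip counts).foldl (fun d p => d.insert p.1 p.2) (⟨[]⟩ : PySem.Dict String Int)).items

-- ===== PRECONDITION & SPEC =====
def Spec_get_bookings_by_day (bookings : List Int) (out : List (String × Int)) : Prop := out = get_bookings_by_day_alt bookings
instance (bookings : List Int) (out : List (String × Int)) : Decidable (Spec_get_bookings_by_day bookings out) := by unfold Spec_get_bookings_by_day; infer_instance

-- ===== CLAIM (what is proved, stated in full; the proofs are below) =====
def Claim_equal_get_bookings_by_day : Prop := ∀ (bookings : List Int), Dom_get_bookings_by_day bookings → Spec_get_bookings_by_day bookings (get_bookings_by_day bookings)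

-- ===== LEMMAS AND PROOFS =====

-- closed-form value both ports compute, as a function of the number n of bookings:
-- day i (0-based) receives (n + 4 - i) / 5 bookings
def pvCnt (n : Nat) : List (String × Int) :=
  [("Monday", (((n + 4) / 5 : Nat) : Int)), ("Tuesday", (((n + 3) / 5 : Nat) : Int)),
   ("Wednesday", (((n + 2) / 5 : Nat) : Int)), ("Thursday", (((n + 1) / 5 : Nat) : Int)),
   ("Friday", ((n / 5 : Nat) : Int))]

-- B's round-robin fold over the enumerated bookings, from any start index k and any
-- five starting values, adds to slot i the number of indices in [k, k + n) ≡ i (mod 5)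
lemma counts_foldl_eq (xs : List Int) (k : Nat) (a b c d e : Int) :
    (PySem.List.enumerate xs (k : Int)).foldl
      (fun c p =>
        PySem.List.pySetD c (p.1 % 5)
          (PySem.List.pyGetD c (p.1 % 5) 0 + 1)) [a, b, c, d, e]
    = [a + ((((k + xs.length + 4) / 5 : Nat) : Int) - (((k + 4) / 5 : Nat) : Int)),
       b + ((((k + xs.length + 3) / 5 : Nat) : Int) - (((k + 3) / 5 : Nat) : Int)),
       c + ((((k + xs.length + 2) / 5 : Nat) : Int) - (((k + 2) / 5 : Nat) : Int)),
       d + ((((k + xs.length + 1) / 5 : Nat) : Int) - (((k + 1) / 5 : Nat) : Int)),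
       e + ((((k + xs.length) / 5 : Nat) : Int) - (((k / 5 : Nat)) : Int))] := by
  induction xs generalizing k a b c d e with
  | nil =>
    simp only [PySem.List.enumerate_nil, List.foldl_nil, List.length_nil, List.cons.injEq,
      and_true]
    omega
  | cons x xs ih =>
    rw [PySem.List.enumerate_cons, List.foldl_cons]
    have hm : ((k : Int)) % 5 = ((k % 5 : Nat) : Int) := by push_cast; omega
    have hk1 : ((k : Int) + 1) = ((k + 1 : Nat) : Int) := by push_cast; ring
    simp only [hm, PySem.List.pySetD_natCast, PySem.List.pyGetD_natCast]
    rcases (show k % 5 = 0 ∨ k % 5 = 1 ∨ k % 5 = 2 ∨ k % 5 = 3 ∨ k % 5 = 4 by omega)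
      with hr | hr | hr | hr | hr <;>
      rw [hr] <;>
      norm_num [List.set, List.getD] <;>
      rw [hk1, ih] <;>
      simp only [List.cons.injEq, and_true] <;>
      omega

lemma alt_eq (bookings : List Int) :
    get_bookings_by_day_alt bookings = pvCnt bookings.length := by
  have h0 := counts_foldl_eq bookings 0 0 0 0 0 0
  norm_num at h0
  simp only [get_bookings_by_day_alt,
    show ∀ i : Int, PySem.Int.mod i 5 = i % 5 from
      fun i => PySem.Int.mod_eq_emod_of_pos (by norm_num)]
  rw [h0]
  simp [pvCnt, List.zip, PySem.Dict.insert, PySem.Dict.contains]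

lemma a_eq (bookings : List Int) :
    get_bookings_by_day bookings = pvCnt bookings.length := by
  by_cases hb : bookings = []
  · subst hb; decide
  · have hf : PySem.Int.floordiv (bookings.length : Int) 5 = (bookings.length : Int) / 5 :=
      PySem.Int.floordiv_eq_ediv_of_pos (by norm_num)
    have hm : PySem.Int.mod (bookings.length : Int) 5 = (bookings.length : Int) % 5 :=
      PySem.Int.mod_eq_emod_of_pos (by norm_num)
    simp only [get_bookings_by_day, hb, ne_eq, not_false_eq_true, if_true, hf, hm,
      PySem.List.enumerate, List.foldl_cons, List.foldl_nil, pvCnt]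
    simp [PySem.Dict.insert, PySem.Dict.contains, List.cons.injEq, Prod.mk.injEq]
    refine ⟨?_, ?_, ?_, ?_, ?_⟩ <;> (try split_ifs) <;> omega

-- ===== VERDICT (by name: the statement is the Claim_ definition above) =====
theorem get_bookings_by_day_spec : Claim_equal_get_bookings_by_day := by
  intro bookings _
  unfold Spec_get_bookings_by_day
  rw [a_eq, alt_eq]
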